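-- pv_equiv track=rewrite | github.com/symbol/product | tools/shoestring/shoestring/internal/NodeFeatures.py | _iter_bits_lsb
-- ===== SOURCE A (Python) =====
-- from enum import Enum, IntFlag
--
-- def _iter_bits_lsb(num):
-- 	# num must be a positive integer
-- 	original = num
-- 	if isinstance(num, Enum):
-- 		num = num.value
--
-- 	if num < 0:
-- 		raise ValueError(f'{original} is not a positive integer')
--
-- 	while num:
-- 		value = num & (~num + 1)
-- 		yield value
-- 		num ^= value
-- ===== SOURCE B (Python) =====
-- from enum import Enum
--
--
-- def _iter_bits_lsb(num):
-- 	# num must be a positive integer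
-- 	original = num
-- 	if isinstance(num, Enum):
-- 		num = num.value
--
-- 	if num < 0:
-- 		raise ValueError(f'{original} is not a positive integer')
--
-- 	i = 0
-- 	while num:
-- 		if num & 1:
-- 			yield 1 << i
-- 		num >>= 1
-- 		i += 1
-- ===== Notes on version B (the rewrite author's own statement) =====
-- stated objective: alternative
-- what changed: B scans bit positions with a shifting copy (num>>=1, yielding 1<<i when num&1 is set) instead of repeatedly isolating the lowest set bit with num&(~num+1) and clearing it with xor.
import Mathlib
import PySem

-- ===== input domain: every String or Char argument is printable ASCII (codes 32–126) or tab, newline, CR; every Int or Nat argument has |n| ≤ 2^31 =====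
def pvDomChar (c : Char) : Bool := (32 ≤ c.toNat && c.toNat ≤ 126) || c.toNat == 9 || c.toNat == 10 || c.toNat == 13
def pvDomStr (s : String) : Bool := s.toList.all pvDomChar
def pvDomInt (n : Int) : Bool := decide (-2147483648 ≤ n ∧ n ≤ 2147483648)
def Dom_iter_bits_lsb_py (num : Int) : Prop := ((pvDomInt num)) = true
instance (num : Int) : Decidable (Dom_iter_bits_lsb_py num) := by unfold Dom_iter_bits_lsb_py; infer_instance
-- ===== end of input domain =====

-- B replaces A's lowest-set-bit isolation loop by a positional scan of a shifting copy; same values, same LSB-first order.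

-- ===== PORT A =====
-- `while num:` as fuel recursion; num.toNat+1 fuel suffices since num strictly decreases on each pass (for num ≥ 0)
def iterBitsGoA : Nat → Int → List Int
  | 0, _ => []
  | fuel + 1, num =>
    if num ≠ 0 then
      let value := PySem.Int.band num (Int.not num + 1)   -- value = num & (~num + 1)
      value :: iterBitsGoA fuel (PySem.Int.bxor num value)  -- yield value; num ^= value
    else []

def iter_bits_lsb_py (num : Int) : List Int :=
  -- the Enum unwrap has no Int counterpart; `raise ValueError` on num < 0 is excluded by Pre_ (port returns [])
  if num < 0 then [] else iterBitsGoA (num.toNat + 1) num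

-- ===== PORT B =====
def iterBitsGoB : Nat → Int → Nat → List Int
  | 0, _, _ => []
  | fuel + 1, num, i =>
    if num ≠ 0 then
      (if PySem.Int.band num 1 ≠ 0 then [(1 : Int) <<< i] else []) ++   -- if num & 1: yield 1 << i
        iterBitsGoB fuel (num >>> (1 : Nat)) (i + 1)                    -- num >>= 1; i += 1
    else []

def iter_bits_lsb_py_alt (num : Int) : List Int :=
  if num < 0 then [] else iterBitsGoB (num.toNat + 1) num 0

-- ===== PRECONDITION & SPEC =====
-- A raises ValueError on num < 0 (and so does B); Pre_ excludes exactly those inputs.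
def Pre_iter_bits_lsb_py (num : Int) : Prop := 0 ≤ num
instance (num : Int) : Decidable (Pre_iter_bits_lsb_py num) := by unfold Pre_iter_bits_lsb_py; infer_instance
def pvWitness_iter_bits_lsb_py : Int := 6

def Spec_iter_bits_lsb_py (num : Int) (out : List Int) : Prop := out = iter_bits_lsb_py_alt num
instance (num : Int) (out : List Int) : Decidable (Spec_iter_bits_lsb_py num out) := by unfold Spec_iter_bits_lsb_py; infer_instance

-- ===== CLAIM (what is proved, stated in full; the proofs are below) =====
def Claim_equal_iter_bits_lsb_py : Prop := ∀ (num : Int), Dom_iter_bits_lsb_py num → Pre_iter_bits_lsb_py num → Spec_iter_bits_lsb_py num (iter_bits_lsb_py num)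

-- ===== LEMMAS AND PROOFS =====

-- Nat-level bit primitives (doubling rules for &&& and ^^^)
theorem pv_and_oe (a b : Nat) : (2*a+1) &&& (2*b) = 2*(a &&& b) := by
  have h := Nat.bitwise_bit (f := and) (a := true) (m := a) (b := false) (n := b)
  simpa [Nat.bit, HAnd.hAnd, AndOp.and, Nat.land] using h

theorem pv_and_eo (a b : Nat) : (2*a) &&& (2*b+1) = 2*(a &&& b) := by
  have h := Nat.bitwise_bit (f := and) (a := false) (m := a) (b := true) (n := b)
  simpa [Nat.bit, HAnd.hAnd, AndOp.and, Nat.land] using h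

theorem pv_xor_ee (a b : Nat) : (2*a) ^^^ (2*b) = 2*(a ^^^ b) := by
  have h := Nat.bitwise_bit (f := bne) (a := false) (m := a) (b := false) (n := b)
  simpa [Nat.bit, HXor.hXor, XorOp.xor, Nat.xor] using h

theorem pv_xor_o1 (a : Nat) : (2*a+1) ^^^ 1 = 2*a := by
  have h := Nat.bitwise_bit (f := bne) (a := true) (m := a) (b := true) (n := 0)
  simpa [Nat.bit, HXor.hXor, XorOp.xor, Nat.xor] using h

-- mathematical form of A's loop state: clear the lowest set bit / the lowest set bit itself
def pvClear (n : Nat) : Nat := n &&& (n - 1)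
def pvLow (n : Nat) : Nat := n - pvClear n

theorem pvClear_le (n : Nat) : pvClear n ≤ n - 1 := Nat.and_le_right

def pvBitsA (n : Nat) : List Int :=
  if _h : 0 < n then ((pvLow n : Nat) : Int) :: pvBitsA (pvClear n) else []
decreasing_by
  have h2 := pvClear_le n
  omega

theorem pv_clear_odd (m : Nat) : pvClear (2*m+1) = 2*m := by
  have h : 2*m+1-1 = 2*m := rfl
  simp only [pvClear, h, pv_and_oe, Nat.and_self]

theorem pv_clear_even (m : Nat) (hm : 0 < m) : pvClear (2*m) = 2 * pvClear m := by
  have h1 : 2*m - 1 = 2*(m-1)+1 := by omega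
  simp only [pvClear, h1, pv_and_eo]

theorem pv_low_odd (m : Nat) : pvLow (2*m+1) = 1 := by
  simp [pvLow, pv_clear_odd]

theorem pv_low_even (m : Nat) (hm : 0 < m) : pvLow (2*m) = 2 * pvLow m := by
  have h1 := pvClear_le m
  simp only [pvLow, pv_clear_even m hm]
  omega

theorem pv_xor_low (n : Nat) (hn : 0 < n) : n ^^^ pvLow n = pvClear n := by
  induction n using Nat.strong_induction_on with
  | _ n ih =>
    rcases Nat.even_or_odd n with ⟨m, hm⟩ | ⟨m, hm⟩
    · have hm' : n = 2*m := by omega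
      subst hm'
      have hmpos : 0 < m := by omega
      rw [pv_low_even m hmpos, pv_xor_ee, ih m (by omega) hmpos, pv_clear_even m hmpos]
    · subst hm
      rw [pv_low_odd, pv_xor_o1, pv_clear_odd]

-- the two Int-level facts the A-loop body produces
theorem pv_band_not (n : Nat) (hn : 0 < n) :
    PySem.Int.band (n : Int) (Int.not (n : Int) + 1) = ((pvLow n : Nat) : Int) := by
  have h0 : Int.not (n : Int) = Int.negSucc n := rfl
  have h1 : Int.not (n : Int) + 1 = -(n : Int) := by rw [h0, Int.negSucc_eq]; ring
  rw [h1]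
  simp only [PySem.Int.band]
  rw [if_pos (by positivity), if_neg (by omega)]
  have h2 : (-(-(n : Int)) - 1).toNat = n - 1 := by omega
  have h3 : ((n : Int)).toNat = n := by omega
  rw [h2, h3]
  rfl

theorem pv_bxor_low (n : Nat) (hn : 0 < n) :
    PySem.Int.bxor (n : Int) ((pvLow n : Nat) : Int) = ((pvClear n : Nat) : Int) := by
  rw [PySem.Int.bxor_natCast, pv_xor_low n hn]

-- halving characterisation of pvBitsA (matches B's loop shape)
theorem pvBitsA_zero : pvBitsA 0 = [] := by rw [pvBitsA]; simp

theorem pvBitsA_double (m : Nat) : pvBitsA (2*m) = (pvBitsA m).map (fun x => 2 * x) := by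
  induction m using Nat.strong_induction_on with
  | _ m ih =>
    by_cases hm : 0 < m
    · rw [pvBitsA, dif_pos (by omega), pv_low_even m hm, pv_clear_even m hm,
        ih (pvClear m) (by have := pvClear_le m; omega)]
      conv_rhs => rw [pvBitsA, dif_pos hm]
      simp [List.map_cons]
    · have h0 : m = 0 := by omega
      subst h0
      simp [pvBitsA_zero]

theorem pvBitsA_step (n : Nat) (hn : 0 < n) :
    pvBitsA n = (if n % 2 = 1 then [(1 : Int)] else []) ++ (pvBitsA (n / 2)).map (fun x => 2 * x) := by
  rcases Nat.even_or_odd n with ⟨m, hm⟩ | ⟨m, hm⟩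
  · have hm' : n = 2*m := by omega
    subst hm'
    have h2 : 2*m % 2 = 0 := by omega
    have h3 : 2*m / 2 = m := by omega
    rw [h2, h3]
    rw [pvBitsA_double]
    simp
  · subst hm
    have h2 : (2*m+1) % 2 = 1 := by omega
    have h3 : (2*m+1) / 2 = m := by omega
    rw [h2, h3]
    rw [pvBitsA, dif_pos hn, pv_low_odd, pv_clear_odd, pvBitsA_double]
    simp

-- A's fueled loop computes pvBitsA
theorem goA_eq (fuel n : Nat) (h : n < fuel) : iterBitsGoA fuel (n : Int) = pvBitsA n := by
  induction fuel generalizing n with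
  | zero => omega
  | succ f ihf =>
    by_cases hn : 0 < n
    · rw [iterBitsGoA]
      rw [if_pos (show (n:Int) ≠ 0 by omega)]
      simp only [pv_band_not n hn, pv_bxor_low n hn]
      rw [ihf (pvClear n) (by have := pvClear_le n; omega)]
      conv_rhs => rw [pvBitsA, dif_pos hn]
    · have : n = 0 := by omega
      subst this
      rw [iterBitsGoA, if_neg (by simp), pvBitsA_zero]

-- B's fueled loop computes pvBitsA scaled by 2^i
theorem goB_eq (fuel : Nat) : ∀ (n i : Nat), n < fuel →
    iterBitsGoB fuel (n : Int) i = (pvBitsA n).map (fun x => 2 ^ i * x) := by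
  induction fuel with
  | zero => intro n i h; omega
  | succ f ihf =>
    intro n i h
    by_cases hn : 0 < n
    · rw [iterBitsGoB]
      rw [if_pos (show (n:Int) ≠ 0 by omega)]
      have hb : PySem.Int.band (n : Int) 1 = ((n &&& 1 : Nat) : Int) := by
        exact_mod_cast PySem.Int.band_natCast n 1
      have hs : ((n : Int)) >>> (1 : Nat) = ((n / 2 : Nat) : Int) := by
        exact Int.mem_toNat?.mp rfl
      rw [hb, hs, ihf (n / 2) (i + 1) (by omega)]
      rw [pvBitsA_step n hn]
      have hmod : n &&& 1 = n % 2 := Nat.and_one_is_mod n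
      rw [List.map_append, List.map_map]
      by_cases ho : n % 2 = 1
      · rw [if_pos (by rw [hmod, ho]; decide), if_pos ho]
        congr 1
        · simp only [List.map_cons, List.map_nil, Int.shiftLeft_eq, mul_one, one_mul]
        · apply List.map_congr_left; intro x _; simp only [Function.comp_apply]; ring
      · rw [if_neg (by rw [hmod]; omega), if_neg ho]
        simp only [List.map_nil, List.nil_append]
        apply List.map_congr_left; intro x _; simp only [Function.comp_apply]; ring
    · have : n = 0 := by omega
      subst this
      rw [iterBitsGoB, if_neg (by simp), pvBitsA_zero]
      simp

-- ===== VERDICT (by name: the statement is the Claim_ definition above) =====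
theorem iter_bits_lsb_py_spec : Claim_equal_iter_bits_lsb_py := by
  intro num hdom hpre
  unfold Spec_iter_bits_lsb_py
  obtain ⟨n, rfl⟩ := Int.eq_ofNat_of_zero_le hpre
  unfold iter_bits_lsb_py iter_bits_lsb_py_alt
  rw [if_neg (by omega), if_neg (by omega)]
  have ht : ((n : Int)).toNat = n := by omega
  rw [ht, goA_eq (n+1) n (by omega), goB_eq (n+1) n 0 (by omega)]
  simp
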